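-- pv_equiv track=rewrite | github.com/YerbaPage/CodeOCR | downstream/tasks/code_clone_detection/data.py | _split_pair
-- ===== SOURCE A (Python) =====
-- from typing import Dict, List, Optional, Tuple
--
-- def _split_pair(text: str) -> Optional[Tuple[str, str]]:
--     lines = text.splitlines()
--     parts = []
--     current = []
--     empty_run = 0
--     for line in lines:
--         if len(parts) >= 2:
--             break
--         if line.strip() == "":
--             empty_run += 1
--         else:
--             if empty_run >= 2 and current:
--                 parts.append("\n".join(current))
--                 if len(parts) >= 2:
--                     break
--                 current = []
--             empty_run = 0
--             current.append(line)
--     if current and len(parts) < 2: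
--         parts.append("\n".join(current))
--     if len(parts) >= 2:
--         return parts[0], parts[1]
--     return None
-- ===== SOURCE B (Python) =====
-- from typing import Optional, Tuple
--
-- def _split_pair(text: str) -> Optional[Tuple[str, str]]:
--     content = [(i, line) for i, line in enumerate(text.splitlines()) if line.strip() != ""]
--     if not content:
--         return None
--     blocks = [[content[0][1]]]
--     for (prev_i, _), (i, line) in zip(content, content[1:]):
--         if i - prev_i >= 3:
--             blocks.append([line])
--         else:
--             blocks[-1].append(line)
--     if len(blocks) < 2:
--         return None
--     return "\n".join(blocks[0]), "\n".join(blocks[1])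
-- ===== Notes on version B (the rewrite author's own statement) =====
-- stated objective: alternative
-- what changed: B never counts blank runs: it filters the enumerated lines down to the non-blank ones with their original indices and groups them by index gap (gap >= 3 between consecutive content lines means >= 2 blank lines separated them), then joins the first two groups.
import Mathlib
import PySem

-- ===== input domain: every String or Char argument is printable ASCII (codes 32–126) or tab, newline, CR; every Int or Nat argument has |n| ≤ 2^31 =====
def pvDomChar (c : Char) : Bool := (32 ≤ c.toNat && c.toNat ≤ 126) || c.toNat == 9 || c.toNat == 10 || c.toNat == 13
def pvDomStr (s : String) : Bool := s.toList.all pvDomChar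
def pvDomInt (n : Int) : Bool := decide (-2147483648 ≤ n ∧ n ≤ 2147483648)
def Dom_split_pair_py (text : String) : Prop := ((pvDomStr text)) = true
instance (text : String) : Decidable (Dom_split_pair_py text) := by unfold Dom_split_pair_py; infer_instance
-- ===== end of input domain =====

-- B replaces A's per-line blank-run counter by filtering the enumerated lines to the
-- non-blank ones and grouping them by index gap (gap >= 3 ⇔ >= 2 blank lines between) —
-- an alternative decomposition, same values.

-- ===== PORT A =====
-- A's for-loop over lines with state (parts, current, empty_run) and break.
def pvALoop : List String → List String → List String → Nat → List String × List String
  | [], parts, current, _ => (parts, current)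
  | line :: rest, parts, current, er =>
    if parts.length ≥ 2 then (parts, current)
    else if PySem.Str.strip line = "" then pvALoop rest parts current (er + 1)
    else if er ≥ 2 ∧ current ≠ [] then
      if (parts ++ [PySem.Str.join "\n" current]).length ≥ 2 then
        (parts ++ [PySem.Str.join "\n" current], current)
      else pvALoop rest (parts ++ [PySem.Str.join "\n" current]) [line] 0
    else pvALoop rest parts (current ++ [line]) 0

-- A's tail: final flush of `current`, then parts[0], parts[1] or None.
def pvAFinish (st : List String × List String) : Option (String × String) :=
  match (if st.2 ≠ [] ∧ st.1.length < 2 then st.1 ++ [PySem.Str.join "\n" st.2] else st.1) with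
  | p0 :: p1 :: _ => some (p0, p1)
  | _ => none

def split_pair_py (text : String) : Option (String × String) :=
  pvAFinish (pvALoop (PySem.Str.splitlines text) [] [] 0)

-- ===== PORT B =====
-- blocks[-1].append(line)
def pvUpdLast : List (List String) → String → List (List String)
  | [], _ => []
  | [b], l => [b ++ [l]]
  | b :: bs, l => b :: pvUpdLast bs l

-- body of B's for-loop over zip(content, content[1:]) with state `blocks`
def pvBStep (blocks : List (List String)) (pr : (Int × String) × (Int × String)) : List (List String) :=
  if pr.2.1 - pr.1.1 ≥ 3 then blocks ++ [[pr.2.2]] else pvUpdLast blocks pr.2.2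

def split_pair_py_alt (text : String) : Option (String × String) :=
  let content := (PySem.List.enumerate (PySem.Str.splitlines text) 0).filter
      (fun p => decide (¬ PySem.Str.strip p.2 = ""))
  match content with
  | [] => none
  | c0 :: _ =>
    match (content.zip content.tail).foldl pvBStep [[c0.2]] with
    | b0 :: b1 :: _ => some (PySem.Str.join "\n" b0, PySem.Str.join "\n" b1)
    | _ => none

-- ===== PRECONDITION & SPEC =====
def Spec_split_pair_py (text : String) (out : Option (String × String)) : Prop := out = split_pair_py_alt text
instance (text : String) (out : Option (String × String)) : Decidable (Spec_split_pair_py text out) := by unfold Spec_split_pair_py; infer_instance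

-- ===== CLAIM (what is proved, stated in full; the proofs are below) =====
def Claim_equal_split_pair_py : Prop := ∀ (text : String), Dom_split_pair_py text → Spec_split_pair_py text (split_pair_py text)

-- ===== LEMMAS AND PROOFS =====

-- Each non-blank line annotated with the number of blank lines since the previous non-blank line
-- (the first annotation includes the incoming accumulator).
def pvGaps : List String → Nat → List (Nat × String)
  | [], _ => []
  | l :: rest, k =>
    if PySem.Str.strip l = "" then pvGaps rest (k + 1) else (k, l) :: pvGaps rest 0

-- Turn gap annotations back into absolute indices starting from `base`.
def pvToIdx : Int → List (Nat × String) → List (Int × String)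
  | _, [] => []
  | b, (k, l) :: gs => (b + k, l) :: pvToIdx (b + k + 1) gs

-- A's loop expressed on the gap-annotated content lines (same branches).
def pvAloop' : List (Nat × String) → List String → List String → List String × List String
  | [], parts, current => (parts, current)
  | (k, l) :: gs, parts, current =>
    if parts.length ≥ 2 then (parts, current)
    else if k ≥ 2 ∧ current ≠ [] then
      if (parts ++ [PySem.Str.join "\n" current]).length ≥ 2 then
        (parts ++ [PySem.Str.join "\n" current], current)
      else pvAloop' gs (parts ++ [PySem.Str.join "\n" current]) [l]
    else pvAloop' gs parts (current ++ [l])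

-- The grouping both programs compute: split the content lines at annotations ≥ 2.
def pvBlocksOf : List (Nat × String) → List String → List (List String)
  | [], cur => [cur]
  | (k, l) :: gs, cur =>
    if k ≥ 2 then cur :: pvBlocksOf gs [l] else pvBlocksOf gs (cur ++ [l])

def pvTake2 : List String → Option (String × String)
  | p0 :: p1 :: _ => some (p0, p1)
  | _ => none

theorem pvAloop'_full (gs : List (Nat × String)) (parts current : List String)
    (h : parts.length ≥ 2) : pvAloop' gs parts current = (parts, current) := by
  cases gs with
  | nil => rfl
  | cons p gs => cases p with | mk k l => simp [pvAloop', h]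

-- A's loop only sees the gap-annotated content lines.
theorem pvALoop_eq_gaps :
    ∀ (lines parts current : List String) (er : Nat),
      pvALoop lines parts current er = pvAloop' (pvGaps lines er) parts current := by
  intro lines
  induction lines with
  | nil => intro parts current er; rfl
  | cons l rest ih =>
    intro parts current er
    by_cases hp : parts.length ≥ 2
    · by_cases hb : PySem.Str.strip l = ""
      · simp [pvALoop, hp, pvGaps, hb, pvAloop'_full _ _ _ hp]
      · simp [pvALoop, hp, pvGaps, hb, pvAloop']
    · by_cases hb : PySem.Str.strip l = ""
      · simp [pvALoop, hp, hb, pvGaps, ih]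
      · simp only [pvALoop, if_neg hp, if_neg hb, pvGaps, pvAloop']
        by_cases hf : er ≥ 2 ∧ current ≠ []
        · simp [hf, ih]
        · simp [hf, ih]

-- A's finish on the gap view is: prepend the already-flushed parts, take two.
theorem pvAFinish_eq_blocks :
    ∀ (gs : List (Nat × String)) (parts current : List String), current ≠ [] → parts.length ≤ 1 →
      pvAFinish (pvAloop' gs parts current)
        = pvTake2 (parts ++ (pvBlocksOf gs current).map (PySem.Str.join "\n")) := by
  intro gs
  induction gs with
  | nil =>
    intro parts current hc hp
    rcases parts with _ | ⟨p0, ptl⟩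
    · simp [pvAloop', pvAFinish, pvBlocksOf, pvTake2, hc]
    · rcases ptl with _ | ⟨q, t⟩
      · simp [pvAloop', pvAFinish, pvBlocksOf, pvTake2, hc]
      · simp at hp
  | cons p gs ih =>
    cases p with | mk k l =>
    intro parts current hc hp
    have hlt : ¬ parts.length ≥ 2 := by omega
    by_cases hk : k ≥ 2
    · simp only [pvAloop', if_neg hlt, if_pos (And.intro hk hc), pvBlocksOf, if_pos hk]
      rcases parts with _ | ⟨p0, ptl⟩
      · rw [if_neg (show ¬ (([] : List String) ++ [PySem.Str.join "\n" current]).length ≥ 2 by simp)]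
        rw [ih _ _ (by simp) (by simp)]
        simp
      · rcases ptl with _ | ⟨q, t⟩
        · rw [if_pos (show (([p0] : List String) ++ [PySem.Str.join "\n" current]).length ≥ 2 by simp)]
          simp [pvAFinish, pvTake2]
        · simp at hp
    · simp only [pvAloop', if_neg hlt, if_neg (show ¬ (k ≥ 2 ∧ current ≠ []) from fun h => hk h.1),
        pvBlocksOf, if_neg hk]
      exact ih _ _ (by simp) hp

-- The filtered enumeration is the gap view re-indexed.
theorem pvFilter_enumerate_eq :
    ∀ (lines : List String) (s : Int) (er : Nat),
      (PySem.List.enumerate lines s).filter (fun p => decide (¬ PySem.Str.strip p.2 = ""))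
        = pvToIdx (s - er) (pvGaps lines er) := by
  intro lines
  induction lines with
  | nil => intro s er; simp [PySem.List.enumerate_nil, pvGaps, pvToIdx]
  | cons l rest ih =>
    intro s er
    by_cases hb : PySem.Str.strip l = ""
    · have h1 : ((s, l) :: PySem.List.enumerate rest (s + 1)).filter
          (fun p => decide (¬ PySem.Str.strip p.2 = ""))
          = (PySem.List.enumerate rest (s + 1)).filter
            (fun p => decide (¬ PySem.Str.strip p.2 = "")) := by simp [hb]
      have h2 : pvGaps (l :: rest) er = pvGaps rest (er + 1) := by simp [pvGaps, hb]
      rw [PySem.List.enumerate_cons, h1, h2, ih (s + 1) (er + 1)]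
      congr 1
      push_cast
      ring
    · have h1 : ((s, l) :: PySem.List.enumerate rest (s + 1)).filter
          (fun p => decide (¬ PySem.Str.strip p.2 = ""))
          = (s, l) :: (PySem.List.enumerate rest (s + 1)).filter
            (fun p => decide (¬ PySem.Str.strip p.2 = "")) := by simp [hb]
      have h2 : pvGaps (l :: rest) er = (er, l) :: pvGaps rest 0 := by simp [pvGaps, hb]
      have e1 : s - (er : Int) + er = s := by omega
      rw [PySem.List.enumerate_cons, h1, h2, ih (s + 1) 0]
      simp only [pvToIdx, e1, Nat.cast_zero, sub_zero]

theorem pvUpdLast_append (done : List (List String)) (cur : List String) (l : String) :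
    pvUpdLast (done ++ [cur]) l = done ++ [cur ++ [l]] := by
  induction done with
  | nil => rfl
  | cons d ds ih =>
    rcases ds with _ | ⟨d2, ds'⟩
    · rfl
    · simpa [pvUpdLast] using ih

-- B's fold over consecutive content pairs computes the same grouping.
theorem pvBFold_eq_blocks :
    ∀ (gs : List (Nat × String)) (base : Int) (k0 : Nat) (l0 : String)
      (done : List (List String)) (cur : List String),
      ((pvToIdx base ((k0, l0) :: gs)).zip (pvToIdx base ((k0, l0) :: gs)).tail).foldl
          pvBStep (done ++ [cur])
        = done ++ pvBlocksOf gs cur := by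
  intro gs
  induction gs with
  | nil => intro base k0 l0 done cur; simp [pvToIdx, pvBlocksOf]
  | cons p gs' ih =>
    cases p with | mk k1 l1 =>
    intro base k0 l0 done cur
    have hz : (pvToIdx base ((k0, l0) :: (k1, l1) :: gs')).zip
        (pvToIdx base ((k0, l0) :: (k1, l1) :: gs')).tail
        = ((base + k0, l0), (base + k0 + 1 + k1, l1)) ::
          ((pvToIdx (base + k0 + 1) ((k1, l1) :: gs')).zip
            (pvToIdx (base + k0 + 1) ((k1, l1) :: gs')).tail) := by
      simp [pvToIdx, List.zip]
    rw [hz, List.foldl_cons]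
    by_cases hk : (2 : Nat) ≤ k1
    · have hcond : ((base + k0 + 1 + k1 : Int) - (base + k0)) ≥ 3 := by
        have : (2 : Int) ≤ (k1 : Int) := by exact_mod_cast hk
        omega
      simp only [pvBStep, if_pos hcond]
      rw [show done ++ [cur] ++ [[l1]] = (done ++ [cur]) ++ [[l1]] from rfl,
        ih (base + k0 + 1) k1 l1 (done ++ [cur]) [l1]]
      simp [pvBlocksOf, hk]
    · have hcond : ¬ ((base + k0 + 1 + k1 : Int) - (base + k0)) ≥ 3 := by
        have : ¬ (2 : Int) ≤ (k1 : Int) := by exact_mod_cast hk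
        omega
      simp only [pvBStep, if_neg hcond]
      rw [pvUpdLast_append, ih (base + k0 + 1) k1 l1 done (cur ++ [l1])]
      simp [pvBlocksOf, hk]

-- ===== VERDICT (by name: the statement is the Claim_ definition above) =====
theorem split_pair_py_spec : Claim_equal_split_pair_py := by
  intro text _
  unfold Spec_split_pair_py split_pair_py split_pair_py_alt
  rw [pvALoop_eq_gaps, pvFilter_enumerate_eq (PySem.Str.splitlines text) 0 0]
  rcases hg : pvGaps (PySem.Str.splitlines text) 0 with _ | ⟨⟨k0, l0⟩, gs⟩
  · simp [pvToIdx, pvAloop', pvAFinish]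
  · have hA : pvAloop' ((k0, l0) :: gs) [] [] = pvAloop' gs [] [l0] := by
      simp [pvAloop']
    rw [hA, pvAFinish_eq_blocks gs [] [l0] (by simp) (by simp)]
    simp only [pvToIdx]
    have hB := pvBFold_eq_blocks gs ((0 : Int) - (0 : Nat)) k0 l0 [] [l0]
    simp only [List.nil_append, pvToIdx] at hB
    rw [hB]
    rcases pvBlocksOf gs [l0] with _ | ⟨b0, _ | ⟨b1, bs⟩⟩ <;> simp [pvTake2]
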